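-- pv_equiv track=rewrite | github.com/Gaineyj0349/RPiNWR | RPiNWR/messages/SAME.py | assemble_chars
-- ===== SOURCE A (Python) =====
-- def assemble_chars(bitstrue, bitsfalse):
--     # the resultant averaged group of chars we get from the bits
--     avgchars = []
--     confidences = [0] * (len(bitstrue) >> 3)
--     # bitwise shift over 3 to keep int (divide by 8)
--     for i in range(0, len(bitstrue) >> 3):
--         # Assemble a character from the various bits
--         c = 0
--         for j in range(0, 8):
--             bit_weight = (bitstrue[(i << 3) + j] - bitsfalse[(i << 3) + j])
--             c |= (bit_weight > 0) << j
--             # confidences.append(abs(bit_weight))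
--             confidences[i] += abs(bit_weight)
--         avgchars.append(chr(c))
--     return avgchars, confidences
-- ===== SOURCE B (Python) =====
-- def assemble_chars(bitstrue, bitsfalse):
--     # Transposed (bit-plane) traversal: for each bit position j, one vectorized
--     # pass over all characters adds that plane's weight into every code and its
--     # absolute difference into every confidence; codes are built by summation
--     # of disjoint powers of two instead of bitwise OR-packing.
--     n = len(bitstrue) >> 3
--     codes = [0] * n
--     confidences = [0] * n
--     for j in range(8):
--         weight = 1 << j
--         diffs = [bitstrue[8 * i + j] - bitsfalse[8 * i + j] for i in range(n)]
--         codes = [c + (weight if d > 0 else 0) for c, d in zip(codes, diffs)]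
--         confidences = [s + abs(d) for s, d in zip(confidences, diffs)]
--     return [chr(c) for c in codes], confidences
-- ===== Notes on version B (the rewrite author's own statement) =====
-- stated objective: alternative
-- what changed: A's per-character nested loop (inner OR-packing of 8 bits into one char) is replaced by a transposed bit-plane traversal: 8 vectorized passes, one per bit position j, each updating ALL character codes by summation of the plane weight 2^j and all confidences at once via zip comprehensions.
import Mathlib
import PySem

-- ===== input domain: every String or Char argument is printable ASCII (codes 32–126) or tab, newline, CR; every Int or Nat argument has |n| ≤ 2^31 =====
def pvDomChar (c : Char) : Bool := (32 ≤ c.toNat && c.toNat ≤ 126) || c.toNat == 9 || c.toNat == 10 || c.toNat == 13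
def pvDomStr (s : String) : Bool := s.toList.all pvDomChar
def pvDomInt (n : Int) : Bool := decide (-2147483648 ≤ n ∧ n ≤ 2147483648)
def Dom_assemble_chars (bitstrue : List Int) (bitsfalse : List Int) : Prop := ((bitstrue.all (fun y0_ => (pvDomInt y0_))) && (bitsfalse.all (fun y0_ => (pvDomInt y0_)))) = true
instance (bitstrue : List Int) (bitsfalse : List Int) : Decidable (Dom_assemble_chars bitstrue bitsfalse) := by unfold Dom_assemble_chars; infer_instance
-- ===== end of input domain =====

-- B replaces A's per-character nested loop by a transposed bit-plane traversal:
-- 8 vectorized passes, one per bit position, summing plane weights into all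
-- codes and confidences at once (objective: alternative).

-- ===== PORT A =====
-- inner 'for j in range(0,8)' body; pyGetD/pySetD are exact here since under
-- Pre_ every index (i<<3)+j is in range; '<<< j.toNat' is exact since j ≥ 0
def pvInnerA (bitstrue bitsfalse : List Int) (i : Int) (st2 : Int × List Int) (j : Int) : Int × List Int :=
  let bw := PySem.List.pyGetD bitstrue ((i <<< (3:Nat)) + j) 0
            - PySem.List.pyGetD bitsfalse ((i <<< (3:Nat)) + j) 0
  (PySem.Int.bor st2.1 ((if bw > 0 then (1:Int) else 0) <<< j.toNat),
   PySem.List.pySetD st2.2 i (PySem.List.pyGetD st2.2 i 0 + |bw|))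

-- outer 'for i in range(0, len(bitstrue) >> 3)' body
def pvOuterA (bitstrue bitsfalse : List Int) (st : List String × List Int) (i : Int) : List String × List Int :=
  let inner := (PySem.List.pyRange 0 8 1).foldl (pvInnerA bitstrue bitsfalse i) (0, st.2)
  -- chr(c): exact, 0 ≤ c ≤ 255 here
  (st.1 ++ [String.ofList [Char.ofNat inner.1.toNat]], inner.2)

def assemble_chars (bitstrue : List Int) (bitsfalse : List Int) : List String × List Int :=
  let n := bitstrue.length >>> 3
  (PySem.List.pyRange 0 (n:Int) 1).foldl (pvOuterA bitstrue bitsfalse)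
    ([], List.replicate n (0:Int))

-- ===== PORT B =====
-- one bit-plane pass, 'for j in range(8)' body: diffs of plane j, then the
-- two zip comprehensions updating every code and every confidence
def pvPlane (bitstrue bitsfalse : List Int) (n : Nat) (st : List Int × List Int) (j : Int) : List Int × List Int :=
  let weight : Int := (1:Int) <<< j.toNat   -- exact: j ≥ 0
  let diffs := (List.range n).map (fun (i : Nat) =>
    PySem.List.pyGetD bitstrue (8 * (i:Int) + j) 0 - PySem.List.pyGetD bitsfalse (8 * (i:Int) + j) 0)
  ((st.1.zip diffs).map (fun p => p.1 + if p.2 > 0 then weight else 0),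
   (st.2.zip diffs).map (fun p => p.1 + |p.2|))

def assemble_chars_alt (bitstrue : List Int) (bitsfalse : List Int) : List String × List Int :=
  let n := bitstrue.length >>> 3
  let fin := (PySem.List.pyRange 0 8 1).foldl (pvPlane bitstrue bitsfalse n)
    (List.replicate n (0:Int), List.replicate n (0:Int))
  -- chr(c): exact, 0 ≤ c ≤ 255 here
  (fin.1.map (fun c => String.ofList [Char.ofNat c.toNat]), fin.2)

-- ===== PRECONDITION & SPEC =====
-- Pre_ excludes exactly the inputs where Python A raises IndexError:
-- bitsfalse shorter than the 8*(len(bitstrue)//8) bits A reads (B raises there too).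
def Pre_assemble_chars (bitstrue : List Int) (bitsfalse : List Int) : Prop :=
  8 * (bitstrue.length >>> 3) ≤ bitsfalse.length

instance (bitstrue : List Int) (bitsfalse : List Int) : Decidable (Pre_assemble_chars bitstrue bitsfalse) := by unfold Pre_assemble_chars; infer_instance

def pvWitness_assemble_chars : List Int × List Int :=
  ([3, 0, -1, 2, 0, 0, 1, -2], [0, 1, 0, 0, 0, 2, 0, 0])

def Spec_assemble_chars (bitstrue : List Int) (bitsfalse : List Int) (out : List String × List Int) : Prop := out = assemble_chars_alt bitstrue bitsfalse
instance (bitstrue : List Int) (bitsfalse : List Int) (out : List String × List Int) : Decidable (Spec_assemble_chars bitstrue bitsfalse out) := by unfold Spec_assemble_chars; infer_instance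

-- ===== CLAIM (what is proved, stated in full; the proofs are below) =====
def Claim_equal_assemble_chars : Prop := ∀ (bitstrue : List Int) (bitsfalse : List Int), Dom_assemble_chars bitstrue bitsfalse → Pre_assemble_chars bitstrue bitsfalse → Spec_assemble_chars bitstrue bitsfalse (assemble_chars bitstrue bitsfalse)

-- ===== LEMMAS AND PROOFS =====

-- signed weight of bit k
def pvW (bitstrue bitsfalse : List Int) (k : Nat) : Int :=
  PySem.List.pyGetD bitstrue (k:Int) 0 - PySem.List.pyGetD bitsfalse (k:Int) 0

-- character code of one 8-weight chunk (A's OR-packed shape)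
def pvCode (d : Nat → Int) : Int :=
  PySem.Int.bor (PySem.Int.bor (PySem.Int.bor (PySem.Int.bor
    (PySem.Int.bor (PySem.Int.bor (PySem.Int.bor
      (if d 0 > 0 then (1:Int) else 0)
      ((if d 1 > 0 then (1:Int) else 0) <<< (1:Nat)))
      ((if d 2 > 0 then (1:Int) else 0) <<< (2:Nat)))
      ((if d 3 > 0 then (1:Int) else 0) <<< (3:Nat)))
      ((if d 4 > 0 then (1:Int) else 0) <<< (4:Nat)))
      ((if d 5 > 0 then (1:Int) else 0) <<< (5:Nat)))
      ((if d 6 > 0 then (1:Int) else 0) <<< (6:Nat)))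
      ((if d 7 > 0 then (1:Int) else 0) <<< (7:Nat))

def pvConf (d : Nat → Int) : Int :=
  |d 0| + |d 1| + |d 2| + |d 3| + |d 4| + |d 5| + |d 6| + |d 7|

def pvStr (d : Nat → Int) : String := String.ofList [Char.ofNat (pvCode d).toNat]

-- one inner-loop step of A, phrased over Nat indices
theorem pvStep (bt bf : List Int) (m : Nat) (c : Int) (l : List Int) (j : Int)
    (hj : 0 ≤ j) (h : m < l.length) :
    pvInnerA bt bf (m:Int) (c, l) j
      = (PySem.Int.bor c ((if pvW bt bf (8 * m + j.toNat) > 0 then (1:Int) else 0) <<< j.toNat),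
         l.set m (l.getD m 0 + |pvW bt bf (8 * m + j.toNat)|)) := by
  unfold pvInnerA pvW
  have hidx : ((m:Int) <<< (3:Nat)) + j = ((8 * m + j.toNat : Nat) : Int) := by
    rw [Int.shiftLeft_eq]
    have := Int.toNat_of_nonneg hj
    push_cast
    omega
  rw [hidx]
  simp [PySem.List.pySetD, PySem.List.pySet?_natCast _ _ _ h]

theorem bor_zero_left (x : Int) : PySem.Int.bor 0 x = x := by
  rw [PySem.Int.bor_comm]; exact PySem.Int.bor_zero x

-- one outer-loop iteration of A
theorem pvInner_eq (bt bf : List Int) (m : Nat) (l : List Int)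
    (h : m < l.length) (h0 : l.getD m 0 = 0) :
    (PySem.List.pyRange 0 8 1).foldl (pvInnerA bt bf (m:Int)) (0, l)
      = (pvCode (fun j => pvW bt bf (8 * m + j)),
         l.set m (pvConf (fun j => pvW bt bf (8 * m + j)))) := by
  rw [show PySem.List.pyRange 0 8 1 = [0, 1, 2, 3, 4, 5, 6, 7] from by decide]
  simp only [List.foldl_cons, List.foldl_nil]
  rw [pvStep bt bf m _ l 0 (by norm_num) h]
  rw [pvStep bt bf m _ _ 1 (by norm_num) (by simpa using h)]
  rw [pvStep bt bf m _ _ 2 (by norm_num) (by simpa using h)]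
  rw [pvStep bt bf m _ _ 3 (by norm_num) (by simpa using h)]
  rw [pvStep bt bf m _ _ 4 (by norm_num) (by simpa using h)]
  rw [pvStep bt bf m _ _ 5 (by norm_num) (by simpa using h)]
  rw [pvStep bt bf m _ _ 6 (by norm_num) (by simpa using h)]
  rw [pvStep bt bf m _ _ 7 (by norm_num) (by simpa using h)]
  have hg : l[m] = 0 := by simpa [List.getD_eq_getElem?_getD, List.getElem?_eq_getElem h] using h0
  simp [List.set_set, h, hg, pvCode, pvConf,
    bor_zero_left, Int.shiftLeft_zero]

-- the outer loop after m of n iterations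
theorem pvA_loop (bt bf : List Int) (m : Nat)
    (hm : m ≤ bt.length >>> 3) :
    (PySem.List.pyRange 0 (m:Int) 1).foldl (pvOuterA bt bf)
        ([], List.replicate (bt.length >>> 3) (0:Int))
      = ((List.range m).map (fun i => pvStr (fun j => pvW bt bf (8 * i + j))),
         (List.range m).map (fun i => pvConf (fun j => pvW bt bf (8 * i + j)))
           ++ List.replicate (bt.length >>> 3 - m) 0) := by
  induction m with
  | zero => simp [PySem.List.pyRange_one_eq_nil]
  | succ m ih =>
    have hm' : m ≤ bt.length >>> 3 := Nat.le_of_succ_le hm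
    have hmn : m < bt.length >>> 3 := hm
    rw [show ((m + 1 : Nat) : Int) = (m : Int) + 1 by push_cast; ring,
        PySem.List.pyRange_one_succ_right (by positivity), List.foldl_append,
        ih hm']
    simp only [List.foldl_cons, List.foldl_nil]
    unfold pvOuterA
    have hlen : ((List.range m).map
          (fun i => pvConf (fun j => pvW bt bf (8 * i + j)))
          ++ List.replicate (bt.length >>> 3 - m) 0).length = bt.length >>> 3 := by
      simp; omega
    have hrep : List.replicate (bt.length >>> 3 - m) (0:Int)
        = (0:Int) :: List.replicate (bt.length >>> 3 - (m + 1)) (0:Int) := by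
      rw [show bt.length >>> 3 - m = (bt.length >>> 3 - (m+1)) + 1 by omega]
      rfl
    rw [pvInner_eq bt bf m _ (by rw [hlen]; exact hmn)
          (by rw [List.getD_append_right _ _ _ _ (by simp), hrep]; simp)]
    simp only [List.range_succ, List.map_append, List.map_cons, List.map_nil]
    refine Prod.ext ?_ ?_
    · simp [pvStr]
    · rw [List.set_append, if_neg (by simp), hrep]
      simp

-- A characterisation
theorem pvA_eq (bitstrue bitsfalse : List Int) :
    assemble_chars bitstrue bitsfalse
      = ((List.range (bitstrue.length >>> 3)).map
           (fun i => pvStr (fun j => pvW bitstrue bitsfalse (8 * i + j))),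
         (List.range (bitstrue.length >>> 3)).map
           (fun i => pvConf (fun j => pvW bitstrue bitsfalse (8 * i + j)))) := by
  unfold assemble_chars
  rw [pvA_loop bitstrue bitsfalse (bitstrue.length >>> 3) le_rfl]
  simp

-- one plane pass of B on map-shaped state
theorem pvPlane_map (bt bf : List Int) (n : Nat) (g h : Nat → Int) (j : Int) (hj : 0 ≤ j) :
    pvPlane bt bf n ((List.range n).map g, (List.range n).map h) j
      = ((List.range n).map (fun i => g i + if pvW bt bf (8 * i + j.toNat) > 0 then (1:Int) <<< j.toNat else 0),
         (List.range n).map (fun i => h i + |pvW bt bf (8 * i + j.toNat)|)) := by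
  simp only [pvPlane]
  rw [List.zip_map', List.zip_map', List.map_map, List.map_map]
  have hidx : ∀ i : Nat, 8 * (i:Int) + j = ((8 * i + j.toNat : Nat) : Int) := by
    intro i
    have := Int.toNat_of_nonneg hj
    push_cast
    omega
  refine Prod.ext ?_ ?_ <;>
  · apply List.map_congr_left
    intro i _
    simp [pvW, hidx i]

-- sum of disjoint plane weights = A's OR-packed code
theorem pvSum_eq_or (x0 x1 x2 x3 x4 x5 x6 x7 : Int) :
    ((((((((0 + (if x0 > 0 then (1:Int) <<< (0:Nat) else 0))
       + (if x1 > 0 then (1:Int) <<< (1:Nat) else 0))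
       + (if x2 > 0 then (1:Int) <<< (2:Nat) else 0))
       + (if x3 > 0 then (1:Int) <<< (3:Nat) else 0))
       + (if x4 > 0 then (1:Int) <<< (4:Nat) else 0))
       + (if x5 > 0 then (1:Int) <<< (5:Nat) else 0))
       + (if x6 > 0 then (1:Int) <<< (6:Nat) else 0))
       + (if x7 > 0 then (1:Int) <<< (7:Nat) else 0))
    = PySem.Int.bor (PySem.Int.bor (PySem.Int.bor (PySem.Int.bor
        (PySem.Int.bor (PySem.Int.bor (PySem.Int.bor
          (if x0 > 0 then (1:Int) else 0)
          ((if x1 > 0 then (1:Int) else 0) <<< (1:Nat)))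
          ((if x2 > 0 then (1:Int) else 0) <<< (2:Nat)))
          ((if x3 > 0 then (1:Int) else 0) <<< (3:Nat)))
          ((if x4 > 0 then (1:Int) else 0) <<< (4:Nat)))
          ((if x5 > 0 then (1:Int) else 0) <<< (5:Nat)))
          ((if x6 > 0 then (1:Int) else 0) <<< (6:Nat)))
          ((if x7 > 0 then (1:Int) else 0) <<< (7:Nat)) := by
  by_cases h0 : x0 > 0 <;> by_cases h1 : x1 > 0 <;> by_cases h2 : x2 > 0 <;>
    by_cases h3 : x3 > 0 <;> by_cases h4 : x4 > 0 <;> by_cases h5 : x5 > 0 <;>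
    by_cases h6 : x6 > 0 <;> by_cases h7 : x7 > 0 <;>
    simp only [h0, h1, h2, h3, h4, h5, h6, h7, if_true, if_false] <;> decide

-- B characterisation
theorem pvB_eq (bitstrue bitsfalse : List Int) :
    assemble_chars_alt bitstrue bitsfalse
      = ((List.range (bitstrue.length >>> 3)).map
           (fun i => pvStr (fun j => pvW bitstrue bitsfalse (8 * i + j))),
         (List.range (bitstrue.length >>> 3)).map
           (fun i => pvConf (fun j => pvW bitstrue bitsfalse (8 * i + j)))) := by
  simp only [assemble_chars_alt]
  rw [show PySem.List.pyRange 0 8 1 = [0, 1, 2, 3, 4, 5, 6, 7] from by decide]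
  rw [show List.replicate (bitstrue.length >>> 3) (0:Int)
        = (List.range (bitstrue.length >>> 3)).map (fun _ => (0:Int)) by
      simp [List.map_const']]
  simp only [List.foldl_cons, List.foldl_nil]
  rw [pvPlane_map _ _ _ _ _ 0 (by norm_num)]
  rw [pvPlane_map _ _ _ _ _ 1 (by norm_num)]
  rw [pvPlane_map _ _ _ _ _ 2 (by norm_num)]
  rw [pvPlane_map _ _ _ _ _ 3 (by norm_num)]
  rw [pvPlane_map _ _ _ _ _ 4 (by norm_num)]
  rw [pvPlane_map _ _ _ _ _ 5 (by norm_num)]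
  rw [pvPlane_map _ _ _ _ _ 6 (by norm_num)]
  rw [pvPlane_map _ _ _ _ _ 7 (by norm_num)]
  rw [List.map_map]
  refine Prod.ext ?_ ?_
  · apply List.map_congr_left
    intro i _
    simp only [Function.comp_apply, show (0:Int).toNat = 0 from rfl, show (1:Int).toNat = 1 from rfl, show (2:Int).toNat = 2 from rfl, show (3:Int).toNat = 3 from rfl, show (4:Int).toNat = 4 from rfl, show (5:Int).toNat = 5 from rfl, show (6:Int).toNat = 6 from rfl, show (7:Int).toNat = 7 from rfl]
    rw [pvSum_eq_or]
    simp [pvStr, pvCode]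
  · apply List.map_congr_left
    intro i _
    simp only [show (0:Int).toNat = 0 from rfl, show (1:Int).toNat = 1 from rfl, show (2:Int).toNat = 2 from rfl, show (3:Int).toNat = 3 from rfl, show (4:Int).toNat = 4 from rfl, show (5:Int).toNat = 5 from rfl, show (6:Int).toNat = 6 from rfl, show (7:Int).toNat = 7 from rfl, pvConf]
    ring

-- ===== VERDICT (by name: the statement is the Claim_ definition above) =====
theorem assemble_chars_spec : Claim_equal_assemble_chars := by
  intro bitstrue bitsfalse _ _
  unfold Spec_assemble_chars
  rw [pvA_eq, pvB_eq]
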